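-- pv_equiv track=rewrite | github.com/rlabs-cl/agentguard-lib | agentguard/validation/checks/imports.py | _build_project_module_set
-- ===== SOURCE A (Python) =====
-- def _build_project_module_set(files: dict[str, str]) -> set[str]:
--     """Build a set of module dotted names from the project file paths.
--
--     For example, 'src/myapp/models/user.py' → {'src', 'src.myapp', 'src.myapp.models', 'src.myapp.models.user'}
--     """
--     modules: set[str] = set()
--     for file_path in files:
--         if not file_path.endswith(".py"):
--             continue
--         # Convert path to module name
--         parts = file_path.replace("\\", "/").split("/")
--         # Remove .py from last part
--         if parts[-1] == "__init__.py":
--             parts = parts[:-1]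
--         else:
--             parts[-1] = parts[-1].removesuffix(".py")
--
--         # Add all prefixes as valid modules
--         for i in range(1, len(parts) + 1):
--             modules.add(".".join(parts[:i]))
--
--     return modules
-- ===== SOURCE B (Python) =====
-- def _build_project_module_set(files: dict[str, str]) -> set[str]:
--     """Build a set of module dotted names from the project file paths
--     by threading a running dotted prefix through each path's parts
--     (instead of re-slicing and re-joining parts[:i] for every i)."""
--     modules: set[str] = set()
--     for file_path in files:
--         if not file_path.endswith(".py"):
--             continue
--         parts = file_path.replace("\\", "/").split("/")
--         if parts[-1] == "__init__.py":
--             parts.pop()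
--         else:
--             parts[-1] = parts[-1].removesuffix(".py")
--         if parts:
--             acc = parts[0]
--             modules.add(acc)
--             for part in parts[1:]:
--                 acc = acc + "." + part
--                 modules.add(acc)
--     return modules
-- ===== Notes on version B (the rewrite author's own statement) =====
-- stated objective: alternative
-- what changed: Replaces the inner index loop over range(1,len(parts)+1) that re-slices parts[:i] and re-joins each prefix with a single scan that threads a running dotted prefix string through the parts, adding it at each step.
import Mathlib
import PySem

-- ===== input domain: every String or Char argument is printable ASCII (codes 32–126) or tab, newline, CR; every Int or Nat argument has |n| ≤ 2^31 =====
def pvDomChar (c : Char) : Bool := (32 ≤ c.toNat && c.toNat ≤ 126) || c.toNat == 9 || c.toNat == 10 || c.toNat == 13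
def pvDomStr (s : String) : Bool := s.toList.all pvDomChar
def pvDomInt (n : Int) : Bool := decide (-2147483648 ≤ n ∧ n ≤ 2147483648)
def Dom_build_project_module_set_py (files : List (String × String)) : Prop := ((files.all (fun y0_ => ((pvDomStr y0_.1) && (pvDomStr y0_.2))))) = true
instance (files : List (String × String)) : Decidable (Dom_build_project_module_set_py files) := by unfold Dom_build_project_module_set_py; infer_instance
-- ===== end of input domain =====

-- B replaces A's inner loop ('.'.join(parts[:i]) for i in range(1,len(parts)+1)) by one scan threading a
-- running dotted prefix; same set, same insertion order (alternative decomposition, no speed claim).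

-- ===== PORT A =====
-- s.removesuffix(".py") has no PySem primitive; exact hand port: check the suffix, drop 3 code points.
def removesuffixPy (s : String) : String :=
  if PySem.Str.endswith s ".py" then PySem.Str.slice s none (some (-3)) else s

-- parts = file_path.replace("\\","/").split("/"); the separator "/" is nonempty so split? is always
-- some (getD [] is never taken) and the result is nonempty, so parts[-1] (pyGetD … (-1) "") never
-- hits the IndexError case.
def partsOf (file_path : String) : List String :=
  let parts := (PySem.Str.split? (PySem.Str.replace file_path "\\" "/") "/").getD []
  if PySem.List.pyGetD parts (-1) "" == "__init__.py"
  then PySem.List.slice parts none (some (-1))          -- A: parts[:-1]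
  else PySem.List.pySetD parts (-1) (removesuffixPy (PySem.List.pyGetD parts (-1) ""))

-- the body of A's 'for file_path in files' loop
def stepA (modules : PySem.Set String) (kv : String × String) : PySem.Set String :=
  if !(PySem.Str.endswith kv.1 ".py") then modules
  else
    let parts := partsOf kv.1
    (PySem.List.pyRange 1 ((parts.length : Int) + 1) 1).foldl
      (fun m i => PySem.Set.add m (PySem.Str.join "." (PySem.List.slice parts none (some i)))) modules

def build_project_module_set_py (files : List (String × String)) : List String :=
  files.foldl stepA PySem.Set.empty

-- ===== PORT B =====
-- B computes parts exactly as A does (pop() of the last element = dropLast), then one scan.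
def partsOfB (file_path : String) : List String :=
  let parts := (PySem.Str.split? (PySem.Str.replace file_path "\\" "/") "/").getD []
  if PySem.List.pyGetD parts (-1) "" == "__init__.py"
  then parts.dropLast                                    -- B: parts.pop()
  else PySem.List.pySetD parts (-1) (removesuffixPy (PySem.List.pyGetD parts (-1) ""))

-- the body of B's 'for file_path in files' loop
def stepB (modules : PySem.Set String) (kv : String × String) : PySem.Set String :=
  if !(PySem.Str.endswith kv.1 ".py") then modules
  else
    match partsOfB kv.1 with
    | [] => modules
    | p :: rest =>
        (rest.foldl (fun (st : PySem.Set String × String) part =>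
            let acc := st.2 ++ "." ++ part
            (PySem.Set.add st.1 acc, acc))
          (PySem.Set.add modules p, p)).1

def build_project_module_set_py_alt (files : List (String × String)) : List String :=
  files.foldl stepB PySem.Set.empty

-- ===== PRECONDITION & SPEC =====
def Spec_build_project_module_set_py (files : List (String × String)) (out : List String) : Prop := out = build_project_module_set_py_alt files
instance (files : List (String × String)) (out : List String) : Decidable (Spec_build_project_module_set_py files out) := by unfold Spec_build_project_module_set_py; infer_instance

-- ===== CLAIM (what is proved, stated in full; the proofs are below) =====
def Claim_equal_build_project_module_set_py : Prop := ∀ (files : List (String × String)), Dom_build_project_module_set_py files → Spec_build_project_module_set_py files (build_project_module_set_py files)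

-- ===== LEMMAS AND PROOFS =====

theorem str_join_singleton (sep p : String) : PySem.Str.join sep [p] = p := by
  apply String.toList_inj.mp
  simp [PySem.Str.toList_join, PySem.Chars.join_singleton]

theorem str_join_cons_cons (sep a b : String) (l : List String) :
    PySem.Str.join sep (a :: b :: l) = a ++ sep ++ PySem.Str.join sep (b :: l) := by
  apply String.toList_inj.mp
  simp [PySem.Str.toList_join, PySem.Chars.join_cons_cons]

-- the chain of running prefixes B adds after the first part
def prefs (acc : String) : List String → List String
  | [] => []
  | q :: rest => (acc ++ "." ++ q) :: prefs (acc ++ "." ++ q) rest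

theorem prefs_map (t : List String) (a b : String) :
    prefs (a ++ "." ++ b) t = (prefs b t).map (fun x => a ++ "." ++ x) := by
  induction t generalizing b with
  | nil => rfl
  | cons q t ih =>
      simp only [prefs, List.map_cons, List.cons.injEq]
      refine ⟨by simp [String.append_assoc], ?_⟩
      rw [show (a ++ "." ++ b) ++ "." ++ q = a ++ "." ++ (b ++ "." ++ q) by
        simp [String.append_assoc]]
      exact ih (b ++ "." ++ q)

-- A's join of parts[:i] for i = 1..len, as a list, is exactly B's chain of running prefixes
theorem aprefs (rest : List String) (p : String) :
    (List.range (p :: rest).length).map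
        (fun k => PySem.Str.join "." ((p :: rest).take (k + 1))) = p :: prefs p rest := by
  induction rest generalizing p with
  | nil => simp [prefs, str_join_singleton]
  | cons q t ih =>
      have hlen : (p :: q :: t).length = (t.length + 1) + 1 := by simp
      rw [hlen, List.range_succ_eq_map, List.map_cons, List.map_map]
      congr 1
      · simp [List.take_succ_cons, str_join_singleton]
      · have hcomp : ((fun k => PySem.Str.join "." ((p :: q :: t).take (k + 1))) ∘ Nat.succ)
            = (fun x => p ++ "." ++ x) ∘ (fun k => PySem.Str.join "." ((q :: t).take (k + 1))) := by
          funext k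
          show PySem.Str.join "." ((p :: q :: t).take (k.succ + 1))
              = p ++ "." ++ PySem.Str.join "." ((q :: t).take (k + 1))
          have e1 : (p :: q :: t).take (k.succ + 1) = p :: q :: t.take k := by
            simp [List.take_succ_cons]
          rw [e1, str_join_cons_cons, ← List.take_succ_cons]
        rw [hcomp, ← List.map_map,
          show t.length + 1 = (q :: t).length by simp, ih q]
        simp only [List.map_cons]
        show (p ++ "." ++ q) :: (prefs q t).map (fun x => p ++ "." ++ x) = prefs p (q :: t)
        rw [prefs]
        congr 1
        exact (prefs_map t p q).symm

theorem bfold (rest : List String) (s : PySem.Set String) (acc : String) :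
    (rest.foldl (fun (st : PySem.Set String × String) part =>
        let a := st.2 ++ "." ++ part
        (PySem.Set.add st.1 a, a)) (s, acc)).1
      = PySem.Set.update s (prefs acc rest) := by
  induction rest generalizing s acc with
  | nil => rfl
  | cons q t ih =>
      simpa [prefs, PySem.Set.update_cons] using
        ih (PySem.Set.add s (acc ++ "." ++ q)) (acc ++ "." ++ q)

theorem partsOfB_eq (fp : String) : partsOfB fp = partsOf fp := by
  unfold partsOf partsOfB
  simp [PySem.List.slice_to_neg_one]

-- A's inner index loop equals an update with the prefix list
theorem afold (parts : List String) (modules : PySem.Set String) :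
    (PySem.List.pyRange 1 ((parts.length : Int) + 1) 1).foldl
        (fun m i => PySem.Set.add m (PySem.Str.join "." (PySem.List.slice parts none (some i)))) modules
      = PySem.Set.update modules
          ((List.range parts.length).map (fun k => PySem.Str.join "." (parts.take (k + 1)))) := by
  have hb : ((parts.length : Int) + 1 - 1).toNat = parts.length := by omega
  rw [PySem.List.pyRange_one, hb, List.foldl_map, ← PySem.Set.update_map_eq_foldl_add]
  congr 1
  apply List.map_congr_left
  intro k hk
  have h1 : (0:Int) ≤ 1 + (k : Int) := by omega
  have h2 : ((1:Int) + (k : Int)).toNat = k + 1 := by omega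
  rw [PySem.List.slice_to _ h1, h2]

theorem step_eq (modules : PySem.Set String) (kv : String × String) :
    stepA modules kv = stepB modules kv := by
  unfold stepA stepB
  by_cases h : PySem.Str.endswith kv.1 ".py" = true
  case neg =>
    rw [Bool.not_eq_true] at h
    rw [if_pos (by rw [h]; rfl), if_pos (by rw [h]; rfl)]
  case pos =>
    rw [if_neg (by rw [h]; simp), if_neg (by rw [h]; simp)]
    rw [partsOfB_eq]
    show (PySem.List.pyRange 1 (((partsOf kv.1).length : Int) + 1) 1).foldl
        (fun m i => PySem.Set.add m (PySem.Str.join "." (PySem.List.slice (partsOf kv.1) none (some i)))) modules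
      = _
    rw [afold]
    cases hp : partsOf kv.1 with
    | nil => rfl
    | cons p rest =>
        rw [aprefs]
        show PySem.Set.update modules (p :: prefs p rest)
            = (rest.foldl (fun (st : PySem.Set String × String) part =>
                let acc := st.2 ++ "." ++ part
                (PySem.Set.add st.1 acc, acc)) (PySem.Set.add modules p, p)).1
        rw [bfold, PySem.Set.update_cons]

-- ===== VERDICT (by name: the statement is the Claim_ definition above) =====
theorem build_project_module_set_py_spec : Claim_equal_build_project_module_set_py := by
  intro files _
  unfold Spec_build_project_module_set_py build_project_module_set_py build_project_module_set_py_alt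
  exact PySem.List.foldl_congr_mem files stepA stepB PySem.Set.empty
    (fun modules kv _ => step_eq modules kv)
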